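-- pv_equiv track=rewrite | github.com/LiquidPulsar/AOC_2024_Python | Day_12/p2.py | num_sides
-- ===== SOURCE A (Python) =====
-- def num_sides(borders:set[tuple[int,int,int,int]]):
--     s = 0
--     while borders:
--         y,x,y2,x2 = borders.pop()
--         s += 1
--         if y!=y2:
--             l = 1
--             while (y,x+l,y2,x2+l) in borders:
--                 borders.remove((y,x+l,y2,x2+l))
--                 l += 1
--             l = -1
--             while (y,x+l,y2,x2+l) in borders:
--                 borders.remove((y,x+l,y2,x2+l))
--                 l -= 1
--         else:
--             l = 1
--             while (y+l,x,y2+l,x2) in borders: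
--                 borders.remove((y+l,x,y2+l,x2))
--                 l += 1
--             l = -1
--             while (y+l,x,y2+l,x2) in borders:
--                 borders.remove((y+l,x,y2+l,x2))
--                 l -= 1
--     return s
-- ===== SOURCE B (Python) =====
-- def num_sides(borders: set[tuple[int, int, int, int]]):
--     # Count each side once, at its first segment: a segment starts a side
--     # exactly when the adjacent segment shifted one step back is absent.
--     # (Like A, empties the input set before returning.)
--     s = 0
--     for (y, x, y2, x2) in borders:
--         prev = (y, x - 1, y2, x2 - 1) if y != y2 else (y - 1, x, y2 - 1, x2)
--         if prev not in borders:
--             s += 1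
--     borders.clear()
--     return s
-- ===== Notes on version B (the rewrite author's own statement) =====
-- stated objective: simpler
-- what changed: A destructively pops a segment and walks/removes its collinear neighbours in both directions to count one side per run; B makes a single pass counting the segments whose one-step-back neighbour is absent (each side is counted exactly once at its first segment), then clears the set to reproduce A's side effect.
import Mathlib
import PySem

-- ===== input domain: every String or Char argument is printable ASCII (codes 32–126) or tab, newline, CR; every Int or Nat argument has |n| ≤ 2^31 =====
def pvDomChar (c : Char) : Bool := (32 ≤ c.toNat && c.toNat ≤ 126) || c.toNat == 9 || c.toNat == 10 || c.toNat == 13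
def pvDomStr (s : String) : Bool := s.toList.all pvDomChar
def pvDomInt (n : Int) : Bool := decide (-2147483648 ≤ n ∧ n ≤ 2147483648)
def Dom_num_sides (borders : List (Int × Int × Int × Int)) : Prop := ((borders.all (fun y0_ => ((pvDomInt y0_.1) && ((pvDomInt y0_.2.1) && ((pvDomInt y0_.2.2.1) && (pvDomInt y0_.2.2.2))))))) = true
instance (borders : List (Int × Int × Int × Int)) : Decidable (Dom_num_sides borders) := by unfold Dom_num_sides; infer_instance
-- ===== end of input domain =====

-- B replaces A's destructive run-removal walk by a single pass that counts the
-- segments whose one-step-back neighbour is absent (one count per side).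
-- A empties the caller's set in place; B reproduces that mutation in Python
-- (borders.clear()); the equivalence proved here is about the return value.

-- ===== PORT A =====
-- inner 'while (…shifted…) in borders: borders.remove(…); l += step' loop of A;
-- the fuel argument (always called with the list's length) is only a totality
-- guard: each pass erases one element, so fuel = length never runs out
def stripA (f : Int → Int × Int × Int × Int) (step : Int) :
    Nat → Int → List (Int × Int × Int × Int) → List (Int × Int × Int × Int)
  | 0, _, b => b
  | fuel + 1, l, b => if f l ∈ b then stripA f step fuel (l + step) (b.erase (f l)) else b

-- the outer 'while borders: … pop … strip both directions … s += 1' loop of A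
-- (set.pop modelled as taking the head; fuel = length is again just a guard)
def numSidesGo : Nat → List (Int × Int × Int × Int) → Int → Int
  | 0, _, s => s
  | fuel + 1, b, s =>
    match b with
    | [] => s
    | (y, x, y2, x2) :: rest =>
      if y ≠ y2 then
        numSidesGo fuel
          (stripA (fun l => (y, x + l, y2, x2 + l)) (-1)
            (stripA (fun l => (y, x + l, y2, x2 + l)) 1 rest.length 1 rest).length (-1)
            (stripA (fun l => (y, x + l, y2, x2 + l)) 1 rest.length 1 rest)) (s + 1)
      else
        numSidesGo fuel
          (stripA (fun l => (y + l, x, y2 + l, x2)) (-1)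
            (stripA (fun l => (y + l, x, y2 + l, x2)) 1 rest.length 1 rest).length (-1)
            (stripA (fun l => (y + l, x, y2 + l, x2)) 1 rest.length 1 rest)) (s + 1)

def num_sides (borders : List (Int × Int × Int × Int)) : Int :=
  numSidesGo borders.length borders 0

-- ===== PORT B =====
def num_sides_alt (borders : List (Int × Int × Int × Int)) : Int :=
  borders.foldl (fun s t =>
    match t with
    | (y, x, y2, x2) =>
      let prev := if y ≠ y2 then (y, x - 1, y2, x2 - 1) else (y - 1, x, y2 - 1, x2)
      if prev ∉ borders then s + 1 else s) 0

-- ===== PRECONDITION & SPEC =====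
-- The Python argument is a set; under the type convention the list holds its
-- DISTINCT elements, so lists with duplicate entries encode no actual input.
def Pre_num_sides (borders : List (Int × Int × Int × Int)) : Prop := borders.Nodup
instance (borders : List (Int × Int × Int × Int)) : Decidable (Pre_num_sides borders) := by unfold Pre_num_sides; infer_instance

def pvWitness_num_sides : (List (Int × Int × Int × Int)) :=
  [(0, 0, 1, 0), (0, 1, 1, 1), (0, 5, 0, 6), (2, 5, 2, 6)]

def Spec_num_sides (borders : List (Int × Int × Int × Int)) (out : Int) : Prop := out = num_sides_alt borders
instance (borders : List (Int × Int × Int × Int)) (out : Int) : Decidable (Spec_num_sides borders out) := by unfold Spec_num_sides; infer_instance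

-- ===== CLAIM (what is proved, stated in full; the proofs are below) =====
def Claim_equal_num_sides : Prop := ∀ (borders : List (Int × Int × Int × Int)), Dom_num_sides borders → Pre_num_sides borders → Spec_num_sides borders (num_sides borders)

-- ===== LEMMAS AND PROOFS =====

-- the predecessor / successor / shift of a segment along its own side
def predSeg : Int × Int × Int × Int → Int × Int × Int × Int
  | (y, x, y2, x2) => if y ≠ y2 then (y, x - 1, y2, x2 - 1) else (y - 1, x, y2 - 1, x2)

def succSeg : Int × Int × Int × Int → Int × Int × Int × Int
  | (y, x, y2, x2) => if y ≠ y2 then (y, x + 1, y2, x2 + 1) else (y + 1, x, y2 + 1, x2)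

def shiftSeg (t : Int × Int × Int × Int) (l : Int) : Int × Int × Int × Int :=
  match t with
  | (y, x, y2, x2) => if y ≠ y2 then (y, x + l, y2, x2 + l) else (y + l, x, y2 + l, x2)

-- number of "side starts": segments whose predecessor is absent
def SN (L : List (Int × Int × Int × Int)) : ℕ :=
  L.countP (fun u => decide (predSeg u ∉ L))

theorem shift_zero (t : Int × Int × Int × Int) : shiftSeg t 0 = t := by
  obtain ⟨y, x, y2, x2⟩ := t
  by_cases h : y = y2 <;> simp [shiftSeg, h]

theorem shift_inj (t : Int × Int × Int × Int) {a b : Int}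
    (h : shiftSeg t a = shiftSeg t b) : a = b := by
  obtain ⟨y, x, y2, x2⟩ := t
  simp only [shiftSeg] at h
  split at h <;> simp_all [Prod.ext_iff] <;> omega

theorem pred_shift (t : Int × Int × Int × Int) (l : Int) :
    predSeg (shiftSeg t l) = shiftSeg t (l - 1) := by
  obtain ⟨y, x, y2, x2⟩ := t
  by_cases h : y = y2 <;> simp [shiftSeg, predSeg, h, Prod.ext_iff] <;> omega

theorem succ_shift (t : Int × Int × Int × Int) (l : Int) :
    succSeg (shiftSeg t l) = shiftSeg t (l + 1) := by
  obtain ⟨y, x, y2, x2⟩ := t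
  by_cases h : y = y2 <;> simp [shiftSeg, succSeg, h, Prod.ext_iff] <;> omega

theorem pred_eq_shift (t : Int × Int × Int × Int) : predSeg t = shiftSeg t (-1) := by
  have := pred_shift t 0
  rw [shift_zero] at this
  simpa using this

theorem succ_eq_shift (t : Int × Int × Int × Int) : succSeg t = shiftSeg t 1 := by
  have := succ_shift t 0
  rw [shift_zero] at this
  simpa using this

theorem pred_succ (u : Int × Int × Int × Int) : predSeg (succSeg u) = u := by
  obtain ⟨y, x, y2, x2⟩ := u
  by_cases h : y = y2 <;> simp [succSeg, predSeg, h, Prod.ext_iff] <;> omega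

theorem succ_pred (u : Int × Int × Int × Int) : succSeg (predSeg u) = u := by
  obtain ⟨y, x, y2, x2⟩ := u
  by_cases h : y = y2 <;> simp [succSeg, predSeg, h, Prod.ext_iff] <;> omega

theorem predSeg_ne_self (u : Int × Int × Int × Int) : predSeg u ≠ u := by
  obtain ⟨y, x, y2, x2⟩ := u
  by_cases h : y = y2 <;> simp [predSeg, h, Prod.ext_iff] <;> omega

theorem succSeg_ne_self (u : Int × Int × Int × Int) : succSeg u ≠ u := by
  obtain ⟨y, x, y2, x2⟩ := u
  by_cases h : y = y2 <;> simp [succSeg, h, Prod.ext_iff] <;> omega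

theorem pred_eq_iff (u w : Int × Int × Int × Int) : predSeg u = w ↔ u = succSeg w := by
  constructor
  · intro h; rw [← h, succ_pred]
  · intro h; rw [h, pred_succ]

-- counting helpers
theorem countP_or_single {α : Type} [DecidableEq α] (p : α → Bool) (v : α) :
    ∀ l : List α, l.Nodup →
      l.countP (fun x => decide (x = v) || p x)
        = l.countP p + (if v ∈ l ∧ p v = false then 1 else 0) := by
  intro l
  induction l with
  | nil => simp
  | cons a l ih =>
    intro nd
    rw [List.nodup_cons] at nd
    rw [List.countP_cons, List.countP_cons, ih nd.2]
    by_cases hav : a = v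
    · subst hav
      have hvl : a ∉ l := nd.1
      cases hpa : p a <;> simp [hpa, hvl]
    · have hva : ¬ v = a := fun h => hav h.symm
      by_cases hvl : v ∈ l <;> cases hpa : p a <;> cases hpv : p v <;>
        simp [hav, hva, hvl, hpa, hpv]

theorem countP_and_ne {α : Type} [DecidableEq α] (p : α → Bool) (w : α) :
    ∀ l : List α, l.Nodup →
      l.countP (fun x => p x && decide (x ≠ w)) + (if w ∈ l ∧ p w = true then 1 else 0)
        = l.countP p := by
  intro l
  induction l with
  | nil => simp
  | cons a l ih =>
    intro nd
    rw [List.nodup_cons] at nd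
    rw [List.countP_cons, List.countP_cons, ← ih nd.2]
    by_cases haw : a = w
    · subst haw
      have hwl : a ∉ l := nd.1
      cases hpa : p a <;> simp [hpa, hwl]
    · have hwa : ¬ w = a := fun h => haw h.symm
      by_cases hwl : w ∈ l <;> cases hpa : p a <;> cases hpw : p w <;>
        simp [haw, hwa, hwl, hpa, hpw]

-- removing one element: how the number of side starts changes
theorem SN_erase (b : List (Int × Int × Int × Int)) (nd : b.Nodup)
    (w : Int × Int × Int × Int) (hw : w ∈ b) :
    SN (b.erase w) + (if predSeg w ∈ b then 0 else 1)
      = SN b + (if succSeg w ∈ b then 1 else 0) := by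
  have hcong : ∀ u, ((decide (predSeg u ∉ b.erase w)) = true)
      ↔ ((decide (u = succSeg w) || decide (predSeg u ∉ b)) = true) := by
    intro u
    have hiff : (predSeg u ∉ b.erase w) ↔ (u = succSeg w ∨ predSeg u ∉ b) := by
      rw [nd.mem_erase_iff, ← pred_eq_iff]
      constructor
      · intro h
        by_cases hq : predSeg u = w
        · exact Or.inl hq
        · exact Or.inr fun hm => h ⟨hq, hm⟩
      · rintro (h | h) hm
        · exact hm.1 h
        · exact h hm.2
    simp only [Bool.or_eq_true, decide_eq_true_eq]
    exact hiff
  have h1 : SN (b.erase w) = (b.erase w).countP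
      (fun u => decide (u = succSeg w) || decide (predSeg u ∉ b)) := by
    unfold SN
    exact List.countP_congr (fun u _ => hcong u)
  have he : b.erase w = b.filter (fun x => decide (x ≠ w)) := by
    rw [nd.erase_eq_filter w]
    apply List.filter_congr
    intro x _
    by_cases hxw : x = w <;> simp [hxw]
  have h2 : (b.erase w).countP (fun u => decide (u = succSeg w) || decide (predSeg u ∉ b))
      = b.countP (fun u => (decide (u = succSeg w) || decide (predSeg u ∉ b)) && decide (u ≠ w)) := by
    rw [he, List.countP_filter]
  have h3 := countP_and_ne (fun u => decide (u = succSeg w) || decide (predSeg u ∉ b)) w b nd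
  have h4 := countP_or_single (fun u => decide (predSeg u ∉ b)) (succSeg w) b nd
  have hps : predSeg (succSeg w) ∈ b := by rw [pred_succ]; exact hw
  have hns : ¬ w = succSeg w := fun h => succSeg_ne_self w h.symm
  rw [h1, h2]
  by_cases hsw : succSeg w ∈ b <;> by_cases hpwb : predSeg w ∈ b <;>
    simp [hsw, hpwb, hw, hps, hns, SN] at h3 h4 ⊢ <;> omega

-- membership in a strip result, for elements the strip can never remove
theorem stripA_sublist (f : Int → Int × Int × Int × Int) (step : Int) :
    ∀ (fuel : ℕ) (b : List (Int × Int × Int × Int)) (l : Int),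
      List.Sublist (stripA f step fuel l b) b := by
  intro fuel
  induction fuel with
  | zero => intro b l; exact List.Sublist.refl _
  | succ fuel ih =>
    intro b l
    rw [stripA]
    split
    · exact (ih _ _).trans (List.erase_sublist ..)
    · exact List.Sublist.refl _

theorem mem_stripA_of_ne (f : Int → Int × Int × Int × Int) (step : Int)
    (u : Int × Int × Int × Int) :
    ∀ (fuel : ℕ) (b : List (Int × Int × Int × Int)) (l : Int),
      (∀ i : ℕ, u ≠ f (l + step * i)) → (u ∈ stripA f step fuel l b ↔ u ∈ b) := by
  intro fuel
  induction fuel with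
  | zero => intro b l _; exact Iff.rfl
  | succ fuel ih =>
    intro b l hni
    rw [stripA]
    split
    · next h =>
      have hne0 : u ≠ f l := by
        have := hni 0
        simpa using this
      have harg : ∀ i : ℕ, l + step + step * (i : ℤ) = l + step * ((i + 1 : ℕ) : ℤ) := by
        intro i; push_cast; ring
      have hrec := ih (b.erase (f l)) (l + step)
        (fun i => by rw [harg i]; exact hni (i + 1))
      rw [hrec, List.mem_erase_of_ne hne0]
    · exact Iff.rfl

theorem strip_up (t : Int × Int × Int × Int) :
    ∀ (fuel : ℕ) (b : List (Int × Int × Int × Int)) (l : Int), b.length ≤ fuel →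
      b.Nodup → shiftSeg t (l - 1) ∉ b →
      SN (stripA (shiftSeg t) 1 fuel l b) + (if shiftSeg t l ∈ b then 1 else 0) = SN b := by
  intro fuel
  induction fuel with
  | zero =>
    intro b l hb _ _
    rw [List.eq_nil_of_length_eq_zero (Nat.le_zero.mp hb)]
    simp [stripA]
  | succ n ih =>
    intro b l hb nd hinv
    rw [stripA]
    split
    · next h =>
      have hnd' : (b.erase (shiftSeg t l)).Nodup := nd.erase _
      have hinv' : shiftSeg t (l + 1 - 1) ∉ b.erase (shiftSeg t l) := by
        have : l + 1 - 1 = l := by ring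
        rw [this]
        exact nd.not_mem_erase
      have hrec := ih (b.erase (shiftSeg t l)) (l + 1)
        (by rw [List.length_erase_of_mem h]; omega) hnd' hinv'
      have herase := SN_erase b nd (shiftSeg t l) h
      rw [pred_shift] at herase
      rw [succ_shift] at herase
      have hmem : shiftSeg t (l + 1) ∈ b.erase (shiftSeg t l) ↔ shiftSeg t (l + 1) ∈ b := by
        apply List.mem_erase_of_ne
        intro hcon
        have := shift_inj t hcon
        omega
      simp only [hinv, if_neg, if_pos h] at herase ⊢
      by_cases hn : shiftSeg t (l + 1) ∈ b <;>
        simp [hn, hmem, hinv] at hrec herase ⊢ <;> omega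
    · next h =>
      simp [h]

theorem strip_down (t : Int × Int × Int × Int) :
    ∀ (fuel : ℕ) (b : List (Int × Int × Int × Int)) (l : Int), b.length ≤ fuel →
      b.Nodup → shiftSeg t (l + 1) ∉ b →
      SN (stripA (shiftSeg t) (-1) fuel l b) + (if shiftSeg t l ∈ b then 1 else 0) = SN b := by
  intro fuel
  induction fuel with
  | zero =>
    intro b l hb _ _
    rw [List.eq_nil_of_length_eq_zero (Nat.le_zero.mp hb)]
    simp [stripA]
  | succ n ih =>
    intro b l hb nd hinv
    rw [stripA]
    split
    · next h =>
      have hnd' : (b.erase (shiftSeg t l)).Nodup := nd.erase _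
      have hinv' : shiftSeg t (l + -1 + 1) ∉ b.erase (shiftSeg t l) := by
        have : l + -1 + 1 = l := by ring
        rw [this]
        exact nd.not_mem_erase
      have hrec := ih (b.erase (shiftSeg t l)) (l + -1)
        (by rw [List.length_erase_of_mem h]; omega) hnd' hinv'
      have herase := SN_erase b nd (shiftSeg t l) h
      rw [pred_shift] at herase
      rw [succ_shift] at herase
      have hmem : shiftSeg t (l + -1) ∈ b.erase (shiftSeg t l) ↔ shiftSeg t (l + -1) ∈ b := by
        apply List.mem_erase_of_ne
        intro hcon
        have := shift_inj t hcon
        omega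
      have hl1 : l - 1 = l + -1 := by ring
      rw [hl1] at herase
      by_cases hp : shiftSeg t (l + -1) ∈ b <;>
        simp [hp, hmem, hinv, h] at hrec herase ⊢ <;> omega
    · next h =>
      simp [h]

-- one iteration of A's outer loop removes one whole side and counts 1
theorem go_step (t : Int × Int × Int × Int) (rest : List (Int × Int × Int × Int))
    (hnt : t ∉ rest) (ndr : rest.Nodup) :
    (SN (stripA (shiftSeg t) (-1)
        (stripA (shiftSeg t) 1 rest.length 1 rest).length (-1)
        (stripA (shiftSeg t) 1 rest.length 1 rest)) : ℤ) + 1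
      = SN (t :: rest) := by
  have hsub1 : List.Sublist (stripA (shiftSeg t) 1 rest.length 1 rest) rest :=
    stripA_sublist _ 1 rest.length rest 1
  have nd1 : (stripA (shiftSeg t) 1 rest.length 1 rest).Nodup :=
    List.Nodup.sublist hsub1 ndr
  have hup := strip_up t rest.length rest 1 le_rfl ndr
    (by rw [show (1 : ℤ) - 1 = 0 by ring, shift_zero]; exact hnt)
  have hdown := strip_down t (stripA (shiftSeg t) 1 rest.length 1 rest).length
    (stripA (shiftSeg t) 1 rest.length 1 rest) (-1) le_rfl nd1
    (by rw [show (-1 : ℤ) + 1 = 0 by ring, shift_zero]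
        intro hmem; exact hnt (hsub1.subset hmem))
  have hcm : shiftSeg t (-1) ∈ stripA (shiftSeg t) 1 rest.length 1 rest
      ↔ shiftSeg t (-1) ∈ rest := by
    apply mem_stripA_of_ne (shiftSeg t) 1 (shiftSeg t (-1)) rest.length rest 1
    intro i h
    have := shift_inj t h
    omega
  have hhead : SN (t :: rest)
      = rest.countP (fun u => decide (predSeg u ∉ t :: rest))
        + (if shiftSeg t (-1) ∈ rest then 0 else 1) := by
    unfold SN
    rw [List.countP_cons]
    congr 1
    have h1 : predSeg t ∉ (t :: rest) ↔ shiftSeg t (-1) ∉ rest := by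
      rw [← pred_eq_shift]
      simp [List.mem_cons, predSeg_ne_self t]
    by_cases hm : shiftSeg t (-1) ∈ rest
    · have h2 : ¬ (predSeg t ∉ t :: rest) := by rw [h1]; simp [hm]
      simp [h2, hm]
      intro hne
      rcases List.mem_cons.mp (not_not.mp h2) with h | h
      · exact absurd h hne
      · exact h
    · have h2 : predSeg t ∉ t :: rest := h1.mpr hm
      simp [h2, hm]
  have hmid : rest.countP (fun u => decide (predSeg u ∉ t :: rest))
      + (if shiftSeg t 1 ∈ rest then 1 else 0) = SN rest := by
    have hc : ∀ u ∈ rest, (decide (predSeg u ∉ t :: rest) = true)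
        ↔ ((decide (predSeg u ∉ rest) && decide (u ≠ succSeg t)) = true) := by
      intro u _
      simp only [Bool.and_eq_true, decide_eq_true_eq, List.mem_cons]
      constructor
      · intro h
        exact ⟨fun hm => h (Or.inr hm), fun he => h (Or.inl (by rw [he, pred_succ]))⟩
      · rintro ⟨h1, h2⟩ (h | h)
        · exact h2 ((pred_eq_iff u t).mp h)
        · exact h1 h
    rw [List.countP_congr hc]
    have hane := countP_and_ne (fun u => decide (predSeg u ∉ rest)) (succSeg t) rest ndr
    have hps : predSeg (succSeg t) ∉ rest := by rw [pred_succ]; exact hnt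
    rw [← succ_eq_shift]
    by_cases hm : succSeg t ∈ rest <;> simp [hm, hps, SN] at hane ⊢ <;> omega
  simp only [hcm] at hdown
  rw [hhead]
  by_cases hm1 : shiftSeg t 1 ∈ rest <;> by_cases hm2 : shiftSeg t (-1) ∈ rest <;>
    simp [hm1, hm2] at hup hdown hhead hmid ⊢ <;> push_cast <;> omega

theorem numSidesGo_eq :
    ∀ (fuel : ℕ) (b : List (Int × Int × Int × Int)) (s : Int), b.length ≤ fuel →
      b.Nodup → numSidesGo fuel b s = s + (SN b : ℤ) := by
  intro fuel
  induction fuel with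
  | zero =>
    intro b s hb _
    rw [List.eq_nil_of_length_eq_zero (Nat.le_zero.mp hb)]
    simp [numSidesGo, SN]
  | succ n ih =>
    intro b s hb nd
    match b, hb, nd with
    | [], _, _ => simp [numSidesGo, SN]
    | (y, x, y2, x2) :: rest, hb, nd =>
      rw [List.nodup_cons] at nd
      rw [numSidesGo]
      have hlen : rest.length ≤ n := by
        simp only [List.length_cons] at hb
        omega
      by_cases hy : y = y2
      · rw [if_neg (by simp [hy])]
        have hf : (fun l => (y + l, x, y2 + l, x2)) = shiftSeg (y, x, y2, x2) :=
          funext fun l => by simp [shiftSeg, hy]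
        rw [hf]
        have hsub1 : List.Sublist (stripA (shiftSeg (y, x, y2, x2)) 1 rest.length 1 rest) rest :=
          stripA_sublist _ 1 rest.length rest 1
        have hsub2 := stripA_sublist (shiftSeg (y, x, y2, x2)) (-1)
          (stripA (shiftSeg (y, x, y2, x2)) 1 rest.length 1 rest).length
          (stripA (shiftSeg (y, x, y2, x2)) 1 rest.length 1 rest) (-1)
        have nd' := List.Nodup.sublist hsub2 (List.Nodup.sublist hsub1 nd.2)
        have hlen' := le_trans (le_trans hsub2.length_le hsub1.length_le) hlen
        rw [ih _ (s + 1) hlen' nd']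
        have := go_step (y, x, y2, x2) rest nd.1 nd.2
        omega
      · rw [if_pos hy]
        have hf : (fun l => (y, x + l, y2, x2 + l)) = shiftSeg (y, x, y2, x2) :=
          funext fun l => by simp [shiftSeg, hy]
        rw [hf]
        have hsub1 : List.Sublist (stripA (shiftSeg (y, x, y2, x2)) 1 rest.length 1 rest) rest :=
          stripA_sublist _ 1 rest.length rest 1
        have hsub2 := stripA_sublist (shiftSeg (y, x, y2, x2)) (-1)
          (stripA (shiftSeg (y, x, y2, x2)) 1 rest.length 1 rest).length
          (stripA (shiftSeg (y, x, y2, x2)) 1 rest.length 1 rest) (-1)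
        have nd' := List.Nodup.sublist hsub2 (List.Nodup.sublist hsub1 nd.2)
        have hlen' := le_trans (le_trans hsub2.length_le hsub1.length_le) hlen
        rw [ih _ (s + 1) hlen' nd']
        have := go_step (y, x, y2, x2) rest nd.1 nd.2
        omega

theorem foldl_count (P : Int × Int × Int × Int → Prop) [DecidablePred P] :
    ∀ (l : List (Int × Int × Int × Int)) (s : Int),
      l.foldl (fun s t => if P t then s + 1 else s) s
        = s + (l.countP (fun t => decide (P t)) : ℤ) := by
  intro l
  induction l with
  | nil => simp
  | cons a l ih =>
    intro s
    rw [List.foldl_cons, ih, List.countP_cons]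
    by_cases h : P a <;> simp [h] <;> push_cast <;> omega

theorem alt_eq_SN (L : List (Int × Int × Int × Int)) : num_sides_alt L = (SN L : ℤ) := by
  have hb : (fun (s : Int) (t : Int × Int × Int × Int) =>
      match t with
      | (y, x, y2, x2) =>
        let prev := if y ≠ y2 then (y, x - 1, y2, x2 - 1) else (y - 1, x, y2 - 1, x2)
        if prev ∉ L then s + 1 else s)
      = fun (s : Int) t => if predSeg t ∉ L then s + 1 else s := by
    funext s t
    obtain ⟨y, x, y2, x2⟩ := t
    simp only [predSeg]
    rfl
  rw [num_sides_alt, hb, foldl_count (fun t => predSeg t ∉ L)]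
  simp [SN]

-- ===== VERDICT (by name: the statement is the Claim_ definition above) =====
theorem num_sides_spec : Claim_equal_num_sides := by
  intro borders _hd hpre
  unfold Spec_num_sides
  rw [alt_eq_SN, num_sides, numSidesGo_eq borders.length borders 0 le_rfl hpre]
  simp
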